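-- pv_equiv track=rewrite | github.com/chinmay-singh/News-Bias-Detection | routines.py | count_seqs
-- ===== SOURCE A (Python) =====
-- def count_seqs(seq, O_idx=0):
--     i = 0
--     mod_T = 0 # |T| or |S|
--     while i < len(seq):
--         if seq[i] != O_idx:
--             this_label = seq[i]
--             mod_T += 1
--             while i < len(seq) and this_label == seq[i]:
--                 i += 1
--         else:
--             i += 1
--
--     return mod_T
-- ===== SOURCE B (Python) =====
-- def count_seqs(seq, O_idx=0):
--     # Single forward pass counting run starts: no nested skip loop.
--     mod_T = 0
--     prev = None
--     for x in seq:
--         if x != O_idx and x != prev: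
--             mod_T += 1
--         prev = x
--     return mod_T
-- ===== Notes on version B (the rewrite author's own statement) =====
-- stated objective: simpler
-- what changed: Replaces A's nested while loops (outer index scan plus inner run-skipping loop) by one flat pass that keeps the previous element and counts run starts (x != O_idx and x != prev).
import Mathlib
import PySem

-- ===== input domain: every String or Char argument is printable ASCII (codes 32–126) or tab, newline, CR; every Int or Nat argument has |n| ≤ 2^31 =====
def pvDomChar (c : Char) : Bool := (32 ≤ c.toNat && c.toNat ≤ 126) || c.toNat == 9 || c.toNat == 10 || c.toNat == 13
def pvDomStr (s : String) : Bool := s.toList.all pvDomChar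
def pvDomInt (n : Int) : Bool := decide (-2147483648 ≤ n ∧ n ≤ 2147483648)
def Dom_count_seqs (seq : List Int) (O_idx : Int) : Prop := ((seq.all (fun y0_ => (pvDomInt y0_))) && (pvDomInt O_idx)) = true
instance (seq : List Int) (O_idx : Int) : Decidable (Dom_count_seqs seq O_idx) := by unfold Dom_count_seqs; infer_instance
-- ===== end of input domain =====

-- B replaces A's nested while loops by a single flat pass tracking the previous
-- element and counting run starts; objective: simpler.


-- ===== PORT A =====
-- inner while: advance i past the elements equal to this_label (position = remaining list)
def count_seqs_skip (this_label : Int) : List Int → List Int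
  | [] => []
  | x :: xs => if this_label = x then count_seqs_skip this_label xs else x :: xs

theorem count_seqs_skip_len_le (l : Int) : ∀ xs : List Int, (count_seqs_skip l xs).length ≤ xs.length
  | [] => Nat.le_refl _
  | x :: xs => by
      unfold count_seqs_skip
      split
      · exact Nat.le_trans (count_seqs_skip_len_le l xs) (Nat.le_succ _)
      · exact Nat.le_refl _

-- outer while: the remaining suffix of seq plays the role of index i; mod_T is the accumulator
def count_seqs_go (O_idx : Int) : List Int → Int → Int
  | [], mod_T => mod_T
  | x :: xs, mod_T =>
      if x ≠ O_idx then
        -- this_label = x; mod_T += 1; inner while consumes x then skips the rest of the run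
        count_seqs_go O_idx (count_seqs_skip x xs) (mod_T + 1)
      else
        count_seqs_go O_idx xs mod_T
termination_by xs _ => xs.length
decreasing_by
  · exact Nat.lt_succ_of_le (count_seqs_skip_len_le x xs)
  · exact Nat.lt_succ_of_le (Nat.le_refl _)

def count_seqs (seq : List Int) (O_idx : Int) : Int := count_seqs_go O_idx seq 0

-- ===== PORT B =====
-- for-loop state: (prev, mod_T); increments when x is a run start
def count_seqs_step (O_idx : Int) (st : Option Int × Int) (x : Int) : Option Int × Int :=
  (some x, if x ≠ O_idx ∧ some x ≠ st.1 then st.2 + 1 else st.2)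

def count_seqs_alt (seq : List Int) (O_idx : Int) : Int :=
  (seq.foldl (count_seqs_step O_idx) (none, 0)).2

-- ===== PRECONDITION & SPEC =====
def Spec_count_seqs (seq : List Int) (O_idx : Int) (out : Int) : Prop := out = count_seqs_alt seq O_idx
instance (seq : List Int) (O_idx : Int) (out : Int) : Decidable (Spec_count_seqs seq O_idx out) := by unfold Spec_count_seqs; infer_instance

-- ===== CLAIM (what is proved, stated in full; the proofs are below) =====
def Claim_equal_count_seqs : Prop := ∀ (seq : List Int) (O_idx : Int), Dom_count_seqs seq O_idx → Spec_count_seqs seq O_idx (count_seqs seq O_idx)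

-- ===== LEMMAS AND PROOFS =====

-- B's fold ignores a prefix equal to prev = some l (the condition some x ≠ st.1 fails on it)
theorem foldl_step_skip (O_idx l : Int) : ∀ (xs : List Int) (c : Int),
    (xs.foldl (count_seqs_step O_idx) (some l, c)).2
      = ((count_seqs_skip l xs).foldl (count_seqs_step O_idx) (some l, c)).2
  | [], _ => rfl
  | x :: xs, c => by
      unfold count_seqs_skip
      by_cases h : l = x
      · subst h
        rw [if_pos rfl, List.foldl_cons]
        simp only [count_seqs_step, ne_eq, not_true_eq_false, and_false, if_false]
        exact foldl_step_skip O_idx l xs c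
      · simp [if_neg h]

-- after skipping a run of l, the head (if any) differs from l
theorem skip_head_ne (l : Int) : ∀ xs : List Int, (count_seqs_skip l xs).head? ≠ some l
  | [] => by simp [count_seqs_skip]
  | x :: xs => by
      unfold count_seqs_skip
      by_cases h : l = x
      · rw [if_pos h]; exact skip_head_ne l xs
      · rw [if_neg h]; simp; exact fun hx => h hx.symm

-- A's loop equals B's fold from any state whose prev cannot match a run start at the head
theorem go_eq_foldl (O_idx : Int) : ∀ (n : Nat) (xs : List Int), xs.length ≤ n →
    ∀ (p : Option Int) (c : Int),
    (∀ v, p = some v → v = O_idx ∨ xs.head? ≠ some v) →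
    count_seqs_go O_idx xs c = (xs.foldl (count_seqs_step O_idx) (p, c)).2 := by
  intro n
  induction n with
  | zero =>
      intro xs hlen p c _
      have : xs = [] := List.eq_nil_of_length_eq_zero (Nat.le_zero.mp hlen)
      subst this
      simp [count_seqs_go]
  | succ n ih =>
      intro xs hlen p c hp
      cases xs with
      | nil => simp [count_seqs_go]
      | cons x xs =>
          by_cases h : x = O_idx
          · -- else branch of A; B does not count either
            have hA : count_seqs_go O_idx (x :: xs) c = count_seqs_go O_idx xs c := by
              conv_lhs => rw [count_seqs_go]
              rw [if_neg (by simp [h])]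
            rw [hA, List.foldl_cons]
            have hstep : count_seqs_step O_idx (p, c) x = (some x, c) := by
              simp [count_seqs_step, h]
            rw [hstep]
            exact ih xs (Nat.le_of_succ_le_succ hlen) (some x) c
              (fun v hv => Or.inl (by injection hv with hv'; rw [← hv', h]))
          · -- run start: A skips the run, B counts once then ignores the equal prefix
            have hpx : some x ≠ p := by
              intro hpx
              rcases hp x hpx.symm with h1 | h2
              · exact h h1
              · exact h2 rfl
            have hA : count_seqs_go O_idx (x :: xs) c
                = count_seqs_go O_idx (count_seqs_skip x xs) (c + 1) := by
              conv_lhs => rw [count_seqs_go]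
              rw [if_pos h]
            have hstep : count_seqs_step O_idx (p, c) x = (some x, c + 1) := by
              simp [count_seqs_step, h, hpx]
            rw [hA, List.foldl_cons, hstep, foldl_step_skip]
            exact ih (count_seqs_skip x xs)
              (Nat.le_trans (count_seqs_skip_len_le x xs) (Nat.le_of_succ_le_succ hlen))
              (some x) (c + 1)
              (fun v hv => Or.inr (by injection hv with hv'; rw [← hv']; exact skip_head_ne x _))

-- ===== VERDICT (by name: the statement is the Claim_ definition above) =====
theorem count_seqs_spec : Claim_equal_count_seqs := by
  intro seq O_idx _
  unfold Spec_count_seqs count_seqs count_seqs_alt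
  exact go_eq_foldl O_idx seq.length seq (Nat.le_refl _) none 0 (by simp)
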